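-- pv_equiv track=rewrite | github.com/pcwmi/style-inspo-api | backend/scripts/generate_digest_html.py | summarize_activities
-- ===== SOURCE A (Python) =====
-- from typing import Dict, List, Optional
--
-- def summarize_activities(activities: List[Dict]) -> Dict:
--     """Summarize activities by type."""
--     summary = {
--         "outfit_generated": [],
--         "outfit_saved": [],
--         "outfit_disliked": [],
--         "visualization_started": [],
--         "visualization_complete": [],
--         "visualization_failed": [],
--         "descriptor_saved": [],
--         "style_words_updated": [],
--         "consider_buying_added": [],
--         "consider_buying_decided": [],
--         "consider_buying_deleted": [],
--         "consider_buying_cleared": [],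
--         "item_uploaded": [],
--         "item_deleted": [],
--     }
--     for activity in activities:
--         action = activity.get("action", "")
--         if action in summary:
--             summary[action].append(activity)
--     return summary
-- ===== SOURCE B (Python) =====
-- KEYS = [
--     "outfit_generated",
--     "outfit_saved",
--     "outfit_disliked",
--     "visualization_started",
--     "visualization_complete",
--     "visualization_failed",
--     "descriptor_saved",
--     "style_words_updated",
--     "consider_buying_added",
--     "consider_buying_decided",
--     "consider_buying_deleted",
--     "consider_buying_cleared",
--     "item_uploaded",
--     "item_deleted",
-- ]
--
--
-- def summarize_activities(activities):
--     """Summarize activities by type: one independent filtering pass per known key."""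
--     return {k: [a for a in activities if a.get("action", "") == k] for k in KEYS}
-- ===== Notes on version B (the rewrite author's own statement) =====
-- stated objective: simpler
-- what changed: B inverts the loop structure: instead of A's single pass that mutates a pre-built dict of empty lists via a membership test and append, B runs one independent filter pass over the activities per known key and assembles the dict directly by comprehension, with no mutation or membership test.
import Mathlib
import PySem

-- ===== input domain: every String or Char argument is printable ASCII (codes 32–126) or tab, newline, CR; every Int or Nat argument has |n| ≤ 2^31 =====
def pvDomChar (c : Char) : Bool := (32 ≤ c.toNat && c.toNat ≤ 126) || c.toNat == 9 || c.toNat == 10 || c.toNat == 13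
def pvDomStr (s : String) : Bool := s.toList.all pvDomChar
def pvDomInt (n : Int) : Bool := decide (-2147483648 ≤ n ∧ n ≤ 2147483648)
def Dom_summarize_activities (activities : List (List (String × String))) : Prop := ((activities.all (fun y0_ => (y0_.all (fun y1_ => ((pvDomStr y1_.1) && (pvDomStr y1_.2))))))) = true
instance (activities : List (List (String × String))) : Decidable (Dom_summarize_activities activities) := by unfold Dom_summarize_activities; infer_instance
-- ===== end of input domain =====

-- B replaces A's single mutating pass over a pre-built dict by one independent filter pass per
-- known key, assembled by comprehension (objective: simpler, no mutation or membership test).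


-- ===== PORT A =====
-- activity.get("action", "")  (lookup on the activity's association list, first match)
def pvAction (a : List (String × String)) : String :=
  (PySem.Dict.mk a).getD "action" ""

-- the literal initial dict of A
def pvInitA : PySem.Dict String (List (List (String × String))) :=
  PySem.Dict.ofList [
    ("outfit_generated", []), ("outfit_saved", []), ("outfit_disliked", []),
    ("visualization_started", []), ("visualization_complete", []), ("visualization_failed", []),
    ("descriptor_saved", []), ("style_words_updated", []),
    ("consider_buying_added", []), ("consider_buying_decided", []),
    ("consider_buying_deleted", []), ("consider_buying_cleared", []),
    ("item_uploaded", []), ("item_deleted", [])]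

def summarize_activities (activities : List (List (String × String))) : List (String × List (List (String × String))) :=
  (activities.foldl
    (fun summary activity =>
      let action := pvAction activity
      if summary.contains action then
        summary.modify action [] (fun v => v ++ [activity])   -- summary[action].append(activity)
      else summary)
    pvInitA).items

-- ===== PORT B =====
def pvKeys : List String :=
  ["outfit_generated", "outfit_saved", "outfit_disliked",
   "visualization_started", "visualization_complete", "visualization_failed",
   "descriptor_saved", "style_words_updated",
   "consider_buying_added", "consider_buying_decided",
   "consider_buying_deleted", "consider_buying_cleared",
   "item_uploaded", "item_deleted"]

-- {k: [a for a in activities if a.get("action","") == k] for k in KEYS}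
def summarize_activities_alt (activities : List (List (String × String))) : List (String × List (List (String × String))) :=
  pvKeys.map (fun k => (k, activities.filter (fun a => pvAction a == k)))

-- ===== PRECONDITION & SPEC =====
def Spec_summarize_activities (activities : List (List (String × String))) (out : List (String × List (List (String × String)))) : Prop := out = summarize_activities_alt activities
instance (activities : List (List (String × String))) (out : List (String × List (List (String × String)))) : Decidable (Spec_summarize_activities activities out) := by unfold Spec_summarize_activities; infer_instance

-- ===== CLAIM (what is proved, stated in full; the proofs are below) =====
def Claim_equal_summarize_activities : Prop := ∀ (activities : List (List (String × String))), Dom_summarize_activities activities → Spec_summarize_activities activities (summarize_activities activities)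

-- ===== LEMMAS AND PROOFS =====

lemma pvKeys_nodup : pvKeys.Nodup := by decide

lemma pvInitA_keys : pvInitA.keys = pvKeys := by decide

lemma pvInitA_getD : ∀ k ∈ pvKeys, pvInitA.getD k [] = [] := by decide

-- A's loop characterized: each known key collects its matching activities in order
lemma loopA (l : List (List (String × String)))
    (d : PySem.Dict String (List (List (String × String)))) (h : d.keys = pvKeys) :
    (l.foldl
      (fun summary activity =>
        let action := pvAction activity
        if summary.contains action then
          summary.modify action [] (fun v => v ++ [activity])
        else summary)
      d).items
    = pvKeys.map (fun k => (k, d.getD k [] ++ l.filter (fun a => pvAction a == k))) := by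
  induction l generalizing d with
  | nil =>
    simp only [List.foldl_nil, List.filter_nil, List.append_nil]
    exact PySem.Dict.items_eq_map_keys d (h ▸ pvKeys_nodup) [] |>.trans (by rw [h])
  | cons a l ih =>
    simp only [List.foldl_cons]
    by_cases hc : d.contains (pvAction a)
    · rw [if_pos hc, ih _ (by rw [PySem.Dict.keys_modify]; simp [PySem.Dict.keys_insert_of_contains, hc, h])]
      apply List.map_congr_left
      intro k hk
      rw [PySem.Dict.getD_modify]
      by_cases hek : k = pvAction a
      · subst hek
        simp [List.append_assoc]
      · have hne : pvAction a ≠ k := fun h' => hek h'.symm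
        simp [hne, hek]
    · rw [if_neg hc]
      rw [ih _ h]
      apply List.map_congr_left
      intro k hk
      have hka : pvAction a ≠ k := by
        intro he
        exact hc (by rw [he]; exact (PySem.Dict.contains_iff_mem_keys _ _).2 (h ▸ hk))
      simp [hka]

-- ===== VERDICT (by name: the statement is the Claim_ definition above) =====
theorem summarize_activities_spec : Claim_equal_summarize_activities := by
  intro activities _
  unfold Spec_summarize_activities summarize_activities summarize_activities_alt
  rw [loopA activities pvInitA pvInitA_keys]
  apply List.map_congr_left
  intro k hk
  rw [pvInitA_getD k hk, List.nil_append]
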